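-- pv_equiv track=rewrite | github.com/nfnmod/SCADA-Intrusion-Detection | .github/IDS/models/TIRP/output.py | parse_raw_instances
-- ===== SOURCE A (Python) =====
-- def parse_raw_instances(raw_instances, size):
--     partial = raw_instances.split(sep=' ')
--     events_dict = dict()
--     last_entity = None
--     for i in range(len(partial)):
--         curr_part = partial[i]
--         if curr_part[0] == '[':
--             # this part of the string represents the times of the instances of the TIRP for a specific entity.
--             start_finish = partial[i].split(sep='-')
--             # loop over instances.
--             start = -1
--             finish = -1
--             for part_num in range(2 * size - 1):
--                 # each instance is split into a list of size 2 * |TIRP| + 1.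
--                 # each part that starts with [ stands for the starting time of an event.
--                 # each part that starts with a number and has no ] in it stands for the finish time of one event and
--                 # the beginning of the next one.
--                 # each part that ends with a ] stands for the finish time of an event.
--                 timestamp = start_finish[part_num]
--                 if timestamp[0] == '[':
--                     start = int(timestamp[1:])
--                 elif timestamp[-1] == ']':
--                     finish = int(timestamp[:-1])
--                     event_times = (start, finish,)
--                     events_dict[last_entity].append(event_times)
--                 else:
--                     finish_index = timestamp.index(']')
--                     start_index = timestamp.index('[')
--                     finish = int(timestamp[:finish_index])
--                     event_times = (start, finish,)
--                     events_dict[last_entity].append(event_times)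
--                     start = int(timestamp[start_index + 1:])
--         else:
--             # this part of the string represents an entity ID.
--             last_entity = partial[i]
--             if last_entity not in events_dict.keys():
--                 events_dict[last_entity] = []
--     return events_dict
-- ===== SOURCE B (Python) =====
-- def _digit_runs(s):
--     runs = []
--     cur = ''
--     for ch in s:
--         if '0' <= ch <= '9':
--             cur += ch
--         else:
--             if cur:
--                 runs.append(cur)
--             cur = ''
--     if cur:
--         runs.append(cur)
--     return runs
--
--
-- def _pair_up(nums):
--     if len(nums) < 2:
--         return []
--     return [(nums[0], nums[1])] + _pair_up(nums[2:])
--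
--
-- def parse_raw_instances(raw_instances, size):
--     events_dict = {}
--     last_entity = None
--     for part in raw_instances.split(sep=' '):
--         if part.startswith('['):
--             limit = max(2 * size - 1, 0)
--             nums = []
--             for tok in part.split(sep='-')[:limit]:
--                 nums.extend(int(run) for run in _digit_runs(tok))
--             events_dict[last_entity].extend(_pair_up(nums))
--         else:
--             last_entity = part
--             events_dict.setdefault(last_entity, [])
--     return events_dict
-- ===== Notes on version B (the rewrite author's own statement) =====
-- stated objective: alternative
-- what changed: The stateful per-token classification of '-'-split timestamp tokens (carrying `start` across branch cases) is replaced by an extract-then-pair strategy: collect all digit runs of the first 2*size-1 tokens, convert to ints, and pair consecutive values; entity dispatch and dict handling are kept.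
-- outside the precondition, e.g. on parse_raw_instances('[3-5]', 1): A returns {}, B raises KeyError; on parse_raw_instances('e [1_0-2][3-4]', 2): A returns {'e': [(10, 2), (3, 4)]}, B returns {'e': [(1, 0), (2, 3)]}
import Mathlib
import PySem

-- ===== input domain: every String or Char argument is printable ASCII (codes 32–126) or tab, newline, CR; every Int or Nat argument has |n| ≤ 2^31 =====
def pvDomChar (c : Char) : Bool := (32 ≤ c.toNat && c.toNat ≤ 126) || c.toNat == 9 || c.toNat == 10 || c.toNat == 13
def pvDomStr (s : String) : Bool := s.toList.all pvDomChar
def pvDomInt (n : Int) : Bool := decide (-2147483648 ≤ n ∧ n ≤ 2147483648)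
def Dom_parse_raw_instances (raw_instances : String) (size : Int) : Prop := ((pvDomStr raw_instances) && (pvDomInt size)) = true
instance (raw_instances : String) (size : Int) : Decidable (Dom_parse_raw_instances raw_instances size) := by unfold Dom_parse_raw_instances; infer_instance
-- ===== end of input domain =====

-- B replaces A's stateful per-token timestamp classification by extracting the digit runs of each
-- block and pairing consecutive values (objective: alternative, same cost).

-- ===== PORT A =====
-- events_dict[last_entity].append(event_times): the KeyError path (last_entity None or missing)
-- returns the dict unchanged — exception path, outside Pre_.
def pvAppendA (d : PySem.Dict String (List (Int × Int))) (le : Option String)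
    (et : Int × Int) : PySem.Dict String (List (Int × Int)) :=
  match le with
  | some e =>
    match d.get? e with
    | some l => d.insert e (l ++ [et])
    | none => d
  | none => d

-- body of the inner 'for part_num in range(2 * size - 1)' loop, for one timestamp token
def pvTsA (le : Option String) (s2 : Int × Int × PySem.Dict String (List (Int × Int)))
    (timestamp : String) : Int × Int × PySem.Dict String (List (Int × Int)) :=
  if PySem.Str.pyGet? timestamp 0 = some '[' then
    ((PySem.Int.ofStr? (PySem.Str.slice timestamp (some 1) none)).getD 0, s2.2.1, s2.2.2)
  else if PySem.Str.pyGet? timestamp (-1) = some ']' then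
    let finish := (PySem.Int.ofStr? (PySem.Str.slice timestamp none (some (-1)))).getD 0
    (s2.1, finish, pvAppendA s2.2.2 le (s2.1, finish))
  else
    let finish_index := PySem.Str.find timestamp "]"
    let start_index := PySem.Str.find timestamp "["
    let finish := (PySem.Int.ofStr? (PySem.Str.slice timestamp none (some finish_index))).getD 0
    let d' := pvAppendA s2.2.2 le (s2.1, finish)
    let start := (PySem.Int.ofStr? (PySem.Str.slice timestamp (some (start_index + 1)) none)).getD 0
    (start, finish, d')

-- body of the outer 'for i in range(len(partial))' loop, for one part
def pvPartA (size : Int) (st : PySem.Dict String (List (Int × Int)) × Option String)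
    (curr_part : String) : PySem.Dict String (List (Int × Int)) × Option String :=
  if PySem.Str.pyGet? curr_part 0 = some '[' then
    let start_finish := (PySem.Str.split? curr_part "-").getD []
    let inner := (PySem.List.pyRange 0 (2 * size - 1) 1).foldl
      (fun s2 part_num => pvTsA st.2 s2 (PySem.List.pyGetD start_finish part_num ""))
      (-1, -1, st.1)
    (inner.2.2, st.2)
  else
    if ¬ st.1.contains curr_part then (st.1.insert curr_part [], some curr_part)
    else (st.1, some curr_part)

def parse_raw_instances (raw_instances : String) (size : Int) : List (String × List (Int × Int)) :=
  let partial_ := (PySem.Str.split? raw_instances " ").getD []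
  let res := (PySem.List.pyRange 0 (partial_.length : Int) 1).foldl
    (fun st i => pvPartA size st (PySem.List.pyGetD partial_ i ""))
    (PySem.Dict.empty, none)
  res.1.items

-- ===== PORT B =====
-- _digit_runs: loop body and scanner
def pvRunsStep (st : List (List Char) × List Char) (ch : Char) : List (List Char) × List Char :=
  if ('0' ≤ ch ∧ ch ≤ '9' : Prop) then (st.1, st.2 ++ [ch])
  else if st.2 ≠ [] then (st.1 ++ [st.2], []) else (st.1, [])

def pvDigitRuns (s : List Char) : List (List Char) :=
  let p := s.foldl pvRunsStep ([], [])
  if p.2 ≠ [] then p.1 ++ [p.2] else p.1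

-- _pair_up
def pvPairUp : List Int → List (Int × Int)
  | a :: b :: rest => (a, b) :: pvPairUp rest
  | _ => []

-- body of the 'for part in raw_instances.split(sep=' ')' loop
def pvPartB (size : Int) (st : PySem.Dict String (List (Int × Int)) × Option String)
    (part : String) : PySem.Dict String (List (Int × Int)) × Option String :=
  if PySem.Str.startswith part "[" then
    let limit : Int := max (2 * size - 1) 0
    let nums := (PySem.List.slice ((PySem.Str.split? part "-").getD []) none (some limit)).foldl
      (fun acc tok => acc ++ (pvDigitRuns tok.toList).map (fun r => (PySem.Int.ofChars? r).getD 0)) []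
    -- events_dict[last_entity].extend(...): KeyError path returns the dict unchanged (outside Pre_)
    match st.2 with
    | some e =>
      (match st.1.get? e with
       | some l => (st.1.insert e (l ++ pvPairUp nums), st.2)
       | none => (st.1, st.2))
    | none => (st.1, st.2)
  else
    (st.1.setdefault part [], some part)

def parse_raw_instances_alt (raw_instances : String) (size : Int) : List (String × List (Int × Int)) :=
  let res := ((PySem.Str.split? raw_instances " ").getD []).foldl (pvPartB size)
    (PySem.Dict.empty, none)
  res.1.items

-- ===== PRECONDITION & SPEC =====
def pvIsDig (c : Char) : Bool := decide ('0' ≤ c ∧ c ≤ '9')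

-- '[' followed by a nonempty digit run ("[12")
def pvTokStart (l : List Char) : Bool :=
  match l with
  | '[' :: rest => !rest.isEmpty && rest.all pvIsDig
  | _ => false

-- digits "][" digits ("12][34")
def pvTokMid (l : List Char) : Bool :=
  match l.dropWhile pvIsDig with
  | ']' :: '[' :: b => !(l.takeWhile pvIsDig).isEmpty && !b.isEmpty && b.all pvIsDig
  | _ => false

-- digits "]" ("12]")
def pvTokEnd (l : List Char) : Bool :=
  !(l.takeWhile pvIsDig).isEmpty && (l.dropWhile pvIsDig == [']'])

def pvCanonTail : List String → Bool
  | [] => true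
  | [t] => pvTokEnd t.toList || pvTokMid t.toList
  | t :: rest => pvTokMid t.toList && pvCanonTail rest

def pvCanon : List String → Bool
  | t :: rest => pvTokStart t.toList && pvCanonTail rest
  | [] => false

-- the 2*size-1 '-'-split tokens A reads form a well-formed timestamp sequence
def pvBlockOK (p : String) (size : Int) : Bool :=
  decide (2 * size - 1 ≤ (((PySem.Str.split? p "-").getD []).length : Int)) &&
  pvCanon (((PySem.Str.split? p "-").getD []).take (2 * size - 1).toNat)

-- Pre_ excludes the inputs on which A raises (an empty space-separated part: IndexError; a time
-- block before any entity: KeyError, except in the degenerate no-event case where B still raises;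
-- a block with fewer than 2*size-1 '-'-tokens or a malformed timestamp token: IndexError/ValueError)
-- and, for uniformity, blocks whose numeric fields are not plain digit runs (Python's int() also
-- accepts signs/underscores/whitespace, which B's digit scanner reads differently).
def Pre_parse_raw_instances (raw_instances : String) (size : Int) : Prop :=
  (∀ p ∈ (PySem.Str.split? raw_instances " ").getD [], p.toList ≠ []) ∧
  PySem.Str.startswith (((PySem.Str.split? raw_instances " ").getD []).headD "") "[" = false ∧
  (∀ p ∈ (PySem.Str.split? raw_instances " ").getD [],
    PySem.Str.startswith p "[" = true → 1 ≤ size → pvBlockOK p size = true)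

instance (raw_instances : String) (size : Int) : Decidable (Pre_parse_raw_instances raw_instances size) := by
  unfold Pre_parse_raw_instances; infer_instance

def pvWitness_parse_raw_instances : String × Int := ("e1 [1-5][7-9] e2 [2-3][4-6]", 2)

def Spec_parse_raw_instances (raw_instances : String) (size : Int) (out : List (String × List (Int × Int))) : Prop := out = parse_raw_instances_alt raw_instances size
instance (raw_instances : String) (size : Int) (out : List (String × List (Int × Int))) : Decidable (Spec_parse_raw_instances raw_instances size out) := by unfold Spec_parse_raw_instances; infer_instance

-- ===== CLAIM (what is proved, stated in full; the proofs are below) =====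
def Claim_equal_parse_raw_instances : Prop := ∀ (raw_instances : String) (size : Int), Dom_parse_raw_instances raw_instances size → Pre_parse_raw_instances raw_instances size → Spec_parse_raw_instances raw_instances size (parse_raw_instances raw_instances size)

-- ===== LEMMAS AND PROOFS =====

-- ---- generic dict facts ----
theorem pv_insert_get_self {κ ν : Type} [BEq κ] [LawfulBEq κ] (d : PySem.Dict κ ν) (k : κ) (v : ν)
    (hnd : d.keys.Nodup) (h : d.get? k = some v) : d.insert k v = d := by
  have hc : d.contains k = true := by
    rw [PySem.Dict.contains_eq_isSome_get?, h]; rfl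
  obtain ⟨pr, hfind, hv⟩ : ∃ pr, d.items.find? (fun p => p.1 == k) = some pr ∧ pr.2 = v := by
    unfold PySem.Dict.get? at h
    cases hf : d.items.find? (fun p => p.1 == k) with
    | none => rw [hf] at h; simp at h
    | some pr => rw [hf] at h; simp at h; exact ⟨pr, rfl, h⟩
  have hmem : pr ∈ d.items := List.mem_of_find?_eq_some hfind
  have hkey : pr.1 = k := by
    have := List.find?_some hfind; simpa using this
  have hinj := List.inj_on_of_nodup_map (l := d.items) (f := Prod.fst)
    (by simpa [PySem.Dict.keys] using hnd)
  have hall : ∀ q ∈ d.items, (if (q.1 == k) = true then (k, v) else q) = q := by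
    intro q hq
    by_cases hqk : (q.1 == k) = true
    · have hq1 : q.1 = k := by simpa using hqk
      have : q = pr := hinj hq hmem (by simp [hq1, hkey])
      simp [this, ← hkey, ← hv]
    · simp [hqk]
  unfold PySem.Dict.insert
  rw [if_pos hc]
  apply PySem.Dict.ext
  simpa using List.map_congr_left hall

-- ---- digit-run scanner facts ----
theorem pv_runsStep_dig {c : Char} (h : pvIsDig c = true) (st : List (List Char) × List Char) :
    pvRunsStep st c = (st.1, st.2 ++ [c]) := by
  have hc : ('0' ≤ c ∧ c ≤ '9') := by simpa [pvIsDig] using h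
  simp [pvRunsStep, hc]

theorem pv_runsGo_digits (a : List Char) (h : a.all pvIsDig = true) (out : List (List Char)) (cur : List Char) :
    a.foldl pvRunsStep (out, cur) = (out, cur ++ a) := by
  induction a generalizing cur with
  | nil => simp
  | cons c a' ih =>
    simp only [List.all_cons, Bool.and_eq_true] at h
    rw [List.foldl_cons, pv_runsStep_dig h.1, ih h.2]
    simp

theorem pv_runs_start (a : List Char) (ha : a ≠ []) (h : a.all pvIsDig = true) :
    pvDigitRuns ('[' :: a) = [a] := by
  have hlb : pvRunsStep ([], []) '[' = ([], []) := by simp [pvRunsStep]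
  unfold pvDigitRuns
  rw [List.foldl_cons, hlb, pv_runsGo_digits a h]
  simp [ha]

theorem pv_runs_end (a : List Char) (ha : a ≠ []) (h : a.all pvIsDig = true) :
    pvDigitRuns (a ++ [']']) = [a] := by
  have hrb : pvRunsStep ([], a) ']' = ([a], []) := by
    simp [pvRunsStep, ha]
  unfold pvDigitRuns
  rw [List.foldl_append, pv_runsGo_digits a h, List.nil_append]
  simp [List.foldl_cons, hrb]

theorem pv_runs_mid (a b : List Char) (ha : a ≠ []) (h : a.all pvIsDig = true)
    (hb : b ≠ []) (h' : b.all pvIsDig = true) :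
    pvDigitRuns (a ++ ']' :: '[' :: b) = [a, b] := by
  have hrb : pvRunsStep ([], a) ']' = ([a], []) := by
    simp [pvRunsStep, ha]
  have hlb : pvRunsStep ([a], []) '[' = ([a], []) := by simp [pvRunsStep]
  unfold pvDigitRuns
  rw [List.foldl_append, pv_runsGo_digits a h, List.nil_append,
      List.foldl_cons, hrb, List.foldl_cons, hlb, pv_runsGo_digits b h']
  simp [hb]

-- ---- find facts ----
theorem pv_find_eq_of (s sub : List Char) (k : Nat) (hk : sub <+: s.drop k)
    (hmin : ∀ i < k, ¬ sub <+: s.drop i) : PySem.Chars.find s sub = (k : Int) := by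
  have hin : PySem.Chars.isIn sub s = true :=
    (PySem.Chars.exists_prefix_drop_iff_isIn sub s).1 ⟨k, hk⟩
  have hnn : 0 ≤ PySem.Chars.find s sub :=
    (PySem.Chars.find_nonneg_iff s sub).2 ((PySem.Chars.isIn_iff_infix sub s).1 hin)
  obtain ⟨hpre, hmin'⟩ := PySem.Chars.find_spec hnn
  have h1 : ¬ (PySem.Chars.find s sub).toNat < k := fun hlt => hmin _ hlt hpre
  have h2 : ¬ k < (PySem.Chars.find s sub).toNat := fun hlt => hmin' _ hlt hk
  omega

theorem pv_head?_drop_append {a r : List Char} {i : Nat} (hi : i < a.length) :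
    ((a ++ r).drop i).head? = a[i]? := by
  rw [List.head?_drop, List.getElem?_append_left hi]

theorem pv_singleton_prefix {c : Char} {xs : List Char} :
    [c] <+: xs ↔ xs.head? = some c := by
  constructor
  · rintro ⟨t, rfl⟩; rfl
  · intro h
    cases xs with
    | nil => simp at h
    | cons x t => simp at h; exact ⟨t, by simp [h]⟩

theorem pv_dig_ne_lb {c : Char} (h : pvIsDig c = true) : c ≠ '[' := by
  rintro rfl; simp [pvIsDig] at h
theorem pv_dig_ne_rb {c : Char} (h : pvIsDig c = true) : c ≠ ']' := by
  rintro rfl; simp [pvIsDig] at h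

theorem pv_find_mid_rb (a b : List Char) (h : a.all pvIsDig = true) :
    PySem.Chars.find (a ++ ']' :: '[' :: b) [']'] = (a.length : Int) := by
  apply pv_find_eq_of
  · rw [List.drop_left]; exact ⟨'[' :: b, rfl⟩
  · intro i hi hpre
    rw [pv_singleton_prefix, pv_head?_drop_append hi] at hpre
    have hmem : a[i] ∈ a := List.getElem_mem hi
    have : pvIsDig a[i] = true := by
      rw [List.all_eq_true] at h; exact h _ hmem
    exact pv_dig_ne_rb this (by simpa [List.getElem?_eq_getElem hi] using hpre)

theorem pv_find_mid_lb (a b : List Char) (h : a.all pvIsDig = true) :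
    PySem.Chars.find (a ++ ']' :: '[' :: b) ['['] = (a.length : Int) + 1 := by
  have heq : ((a.length : Int) + 1) = ((a.length + 1 : Nat) : Int) := by push_cast; ring
  rw [heq]
  apply pv_find_eq_of
  · have hdrop : (a ++ ']' :: '[' :: b).drop (a.length + 1) = '[' :: b := by
      rw [← List.drop_drop, List.drop_left]; rfl
    rw [hdrop]; exact ⟨b, rfl⟩
  · intro i hi hpre
    rw [pv_singleton_prefix] at hpre
    rcases Nat.lt_or_ge i a.length with hia | hia
    · rw [pv_head?_drop_append hia] at hpre
      have hmem : a[i] ∈ a := List.getElem_mem hia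
      have : pvIsDig a[i] = true := by
        rw [List.all_eq_true] at h; exact h _ hmem
      exact pv_dig_ne_lb this (by simpa [List.getElem?_eq_getElem hia] using hpre)
    · have : i = a.length := by omega
      subst this
      rw [List.drop_left] at hpre
      simp at hpre

-- ---- per-token step of A on canonical tokens ----
theorem pv_tsA_start (le : Option String) (s2 : Int × Int × PySem.Dict String (List (Int × Int)))
    (t : String) (a : List Char) (ht : t.toList = '[' :: a) (_ha : a ≠ []) (_hd : a.all pvIsDig = true) :
    pvTsA le s2 t = ((PySem.Int.ofChars? a).getD 0, s2.2.1, s2.2.2) := by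
  have h0 : PySem.Str.pyGet? t 0 = some '[' := by
    rw [show (0 : Int) = ((0 : Nat) : Int) from rfl, PySem.Str.pyGet?_natCast, ht]; rfl
  have hsl : (PySem.Str.slice t (some 1) none).toList = a := by
    rw [PySem.Str.toList_slice]
    simp [PySem.List.slice_from_one, ht]
  unfold pvTsA
  rw [if_pos h0, PySem.Int.ofStr?, hsl]

theorem pv_tsA_end (le : Option String) (s2 : Int × Int × PySem.Dict String (List (Int × Int)))
    (t : String) (a : List Char) (ht : t.toList = a ++ [']']) (ha : a ≠ []) (hd : a.all pvIsDig = true) :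
    pvTsA le s2 t =
      (s2.1, (PySem.Int.ofChars? a).getD 0,
       pvAppendA s2.2.2 le (s2.1, (PySem.Int.ofChars? a).getD 0)) := by
  obtain ⟨c, a', rfl⟩ : ∃ c a', a = c :: a' := by
    cases a with
    | nil => exact absurd rfl ha
    | cons c a' => exact ⟨c, a', rfl⟩
  have hc : pvIsDig c = true := by
    rw [List.all_eq_true] at hd; exact hd _ (by simp)
  have h0 : PySem.Str.pyGet? t 0 ≠ some '[' := by
    rw [show (0 : Int) = ((0 : Nat) : Int) from rfl, PySem.Str.pyGet?_natCast, ht]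
    simpa using fun h => pv_dig_ne_lb hc h
  have h1 : PySem.Str.pyGet? t (-1) = some ']' := by
    rw [PySem.Str.pyGet?_eq, PySem.Chars.pyGet?_eq_listPyGet?, PySem.List.pyGet?_neg_one, ht, List.getLast?_concat]
  have hsl : (PySem.Str.slice t none (some (-1))).toList = c :: a' := by
    rw [PySem.Str.slice_to_neg_one, ht, List.dropLast_concat]
  unfold pvTsA
  rw [if_neg h0, if_pos h1, PySem.Int.ofStr?, hsl]

theorem pv_tsA_mid (le : Option String) (s2 : Int × Int × PySem.Dict String (List (Int × Int)))
    (t : String) (a b : List Char) (ht : t.toList = a ++ ']' :: '[' :: b)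
    (ha : a ≠ []) (hda : a.all pvIsDig = true) (hb : b ≠ []) (hdb : b.all pvIsDig = true) :
    pvTsA le s2 t =
      ((PySem.Int.ofChars? b).getD 0, (PySem.Int.ofChars? a).getD 0,
       pvAppendA s2.2.2 le (s2.1, (PySem.Int.ofChars? a).getD 0)) := by
  obtain ⟨c, a', rfl⟩ : ∃ c a', a = c :: a' := by
    cases a with
    | nil => exact absurd rfl ha
    | cons c a' => exact ⟨c, a', rfl⟩
  have hc : pvIsDig c = true := by
    rw [List.all_eq_true] at hda; exact hda _ (by simp)
  obtain ⟨bl, hbl⟩ : ∃ bl, b.getLast? = some bl := by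
    cases hb' : b.getLast? with
    | none => exact absurd (List.getLast?_eq_none_iff.1 hb') hb
    | some bl => exact ⟨bl, rfl⟩
  have hbd : pvIsDig bl = true := by
    rw [List.all_eq_true] at hdb; exact hdb _ (List.mem_of_getLast? hbl)
  have h0 : PySem.Str.pyGet? t 0 ≠ some '[' := by
    rw [show (0 : Int) = ((0 : Nat) : Int) from rfl, PySem.Str.pyGet?_natCast, ht]
    simpa using fun h => pv_dig_ne_lb hc h
  have h1 : PySem.Str.pyGet? t (-1) ≠ some ']' := by
    rw [PySem.Str.pyGet?_eq, PySem.Chars.pyGet?_eq_listPyGet?, PySem.List.pyGet?_neg_one, ht]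
    have : ((c :: a') ++ ']' :: '[' :: b).getLast? = some bl := by
      have hb2 : (']' :: '[' :: b).getLast? = some bl := by
        cases b with
        | nil => exact absurd rfl hb
        | cons x xs => simpa using hbl
      rw [List.getLast?_append_of_ne_nil _ (by simp), hb2]
    rw [this]
    simpa using fun h => pv_dig_ne_rb hbd h
  have hfr : PySem.Str.find t "]" = ((c :: a').length : Int) := by
    rw [PySem.Str.find_eq, ht, show ("]" : String).toList = [']'] from rfl]
    exact pv_find_mid_rb _ b hda
  have hfl : PySem.Str.find t "[" = ((c :: a').length : Int) + 1 := by
    rw [PySem.Str.find_eq, ht, show ("[" : String).toList = ['['] from rfl]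
    exact pv_find_mid_lb _ b hda
  have hsl1 : (PySem.Str.slice t none (some ((c :: a').length : Int))).toList = c :: a' := by
    rw [PySem.Str.toList_slice, PySem.Chars.slice_eq_listSlice, ht,
        PySem.List.slice_to _ (by positivity)]
    simp
  have hsl2 : (PySem.Str.slice t (some (((c :: a').length : Int) + 1 + 1)) none).toList = b := by
    have heq : (((c :: a').length : Int) + 1 + 1) = (((c :: a').length + 2 : Nat) : Int) := by
      push_cast; ring
    rw [PySem.Str.toList_slice, PySem.Chars.slice_eq_listSlice, ht, heq,
        PySem.List.slice_from _ (by positivity)]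
    rw [Int.toNat_natCast, ← List.drop_drop, List.drop_left]
    rfl
  unfold pvTsA
  simp only [if_neg h0, if_neg h1, hfr, hfl, PySem.Int.ofStr?, hsl1, hsl2]

-- ---- token-shape decompositions ----
theorem pv_tokStart_shape {l : List Char} (h : pvTokStart l = true) :
    ∃ a, l = '[' :: a ∧ a ≠ [] ∧ a.all pvIsDig = true := by
  unfold pvTokStart at h
  split at h
  · next a =>
    simp only [Bool.and_eq_true, Bool.not_eq_true'] at h
    exact ⟨a, rfl, fun hn => by rw [hn] at h; simp at h, h.2⟩
  · exact absurd h (by simp)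

theorem pv_tokEnd_shape {l : List Char} (h : pvTokEnd l = true) :
    ∃ a, l = a ++ [']'] ∧ a ≠ [] ∧ a.all pvIsDig = true := by
  unfold pvTokEnd at h
  simp only [Bool.and_eq_true, beq_iff_eq, Bool.not_eq_true'] at h
  refine ⟨l.takeWhile pvIsDig, ?_, ?_, ?_⟩
  · rw [← h.2]; exact (List.takeWhile_append_dropWhile).symm
  · intro hn; rw [hn] at h; simp at h
  · rw [List.all_eq_true]; exact fun c hc => List.mem_takeWhile_imp hc

theorem pv_tokMid_shape {l : List Char} (h : pvTokMid l = true) :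
    ∃ a b, l = a ++ ']' :: '[' :: b ∧ a ≠ [] ∧ a.all pvIsDig = true ∧ b ≠ [] ∧ b.all pvIsDig = true := by
  unfold pvTokMid at h
  split at h
  · next b heq =>
    simp only [Bool.and_eq_true, Bool.not_eq_true'] at h
    refine ⟨l.takeWhile pvIsDig, b, ?_, ?_, ?_, ?_, by tauto⟩
    · rw [← heq]; exact (List.takeWhile_append_dropWhile).symm
    · intro hn; rw [hn] at h; simp at h
    · rw [List.all_eq_true]; exact fun c hc => List.mem_takeWhile_imp hc
    · intro hn; rw [hn] at h; simp at h
  · exact absurd h (by simp)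

-- numbers B extracts from a token list
def pvNums (ts : List String) : List Int :=
  ts.flatMap (fun t => (pvDigitRuns t.toList).map (fun r => (PySem.Int.ofChars? r).getD 0))

-- ---- the core: A's stateful loop over a canonical tail = pairing of the extracted numbers ----
theorem pv_core_tail (e : String) (rest : List String) (h : pvCanonTail rest = true) :
    ∀ (s f : Int) (d : PySem.Dict String (List (Int × Int))) (l : List (Int × Int)),
      d.keys.Nodup → d.get? e = some l →
      (rest.foldl (pvTsA (some e)) (s, f, d)).2.2 = d.insert e (l ++ pvPairUp (s :: pvNums rest)) := by
  induction rest with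
  | nil =>
    intro s f d l hnd hl
    simp only [List.foldl_nil, pvNums, List.flatMap_nil, pvPairUp, List.append_nil]
    exact (pv_insert_get_self d e l hnd hl).symm
  | cons t rest ih =>
    intro s f d l hnd hl
    cases rest with
    | nil =>
      have h' : pvTokEnd t.toList = true ∨ pvTokMid t.toList = true := by
        simpa [pvCanonTail, Bool.or_eq_true] using h
      rcases h' with hE | hM
      · obtain ⟨a, ht, ha, hd⟩ := pv_tokEnd_shape hE
        rw [List.foldl_cons, pv_tsA_end (some e) _ t a ht ha hd, List.foldl_nil]
        simp only [pvAppendA, hl]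
        rw [pvNums]
        simp [ht, pv_runs_end a ha hd, pvPairUp]
      · obtain ⟨a, b, ht, ha, hda, hb, hdb⟩ := pv_tokMid_shape hM
        rw [List.foldl_cons, pv_tsA_mid (some e) _ t a b ht ha hda hb hdb, List.foldl_nil]
        simp only [pvAppendA, hl]
        rw [pvNums]
        simp [ht, pv_runs_mid a b ha hda hb hdb, pvPairUp]
    | cons u v =>
      have hsplit : pvTokMid t.toList = true ∧ pvCanonTail (u :: v) = true := by
        simpa [pvCanonTail] using h
      obtain ⟨a, b, ht, ha, hda, hb, hdb⟩ := pv_tokMid_shape hsplit.1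
      rw [List.foldl_cons, pv_tsA_mid (some e) _ t a b ht ha hda hb hdb]
      simp only [pvAppendA, hl]
      rw [ih hsplit.2 _ _ _ (l ++ [(s, (PySem.Int.ofChars? a).getD 0)])
            (PySem.Dict.nodup_keys_insert _ _ _ hnd) (PySem.Dict.get?_insert_self _ _ _),
          PySem.Dict.insert_insert_self]
      have hnums : pvNums (t :: u :: v) =
          (PySem.Int.ofChars? a).getD 0 :: (PySem.Int.ofChars? b).getD 0 :: pvNums (u :: v) := by
        rw [pvNums, List.flatMap_cons, ht, pv_runs_mid a b ha hda hb hdb]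
        rfl
      rw [hnums, show ∀ x y z rest', pvPairUp (x :: y :: z :: rest') = (x, y) :: pvPairUp (z :: rest') from fun _ _ _ _ => rfl]
      simp

theorem pv_core (e : String) (xs : List String) (h : pvCanon xs = true)
    (d : PySem.Dict String (List (Int × Int))) (l : List (Int × Int))
    (hnd : d.keys.Nodup) (hl : d.get? e = some l) :
    (xs.foldl (pvTsA (some e)) (-1, -1, d)).2.2 = d.insert e (l ++ pvPairUp (pvNums xs)) := by
  cases xs with
  | nil => simp [pvCanon] at h
  | cons t rest =>
    have hsplit : pvTokStart t.toList = true ∧ pvCanonTail rest = true := by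
      simpa [pvCanon] using h
    obtain ⟨a, ht, ha, hd⟩ := pv_tokStart_shape hsplit.1
    rw [List.foldl_cons, pv_tsA_start (some e) _ t a ht ha hd,
        pv_core_tail e rest hsplit.2 _ _ d l hnd hl]
    have hnums : pvNums (t :: rest) = (PySem.Int.ofChars? a).getD 0 :: pvNums rest := by
      rw [pvNums, List.flatMap_cons, ht, pv_runs_start a ha hd]
      rfl
    rw [hnums]

theorem pv_startswith_lb (p : String) :
    PySem.Str.startswith p "[" = true ↔ PySem.Str.pyGet? p 0 = some '[' := by
  rw [PySem.Str.startswith_eq, PySem.Chars.startswith_iff,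
      show ("[" : String).toList = ['['] from rfl, pv_singleton_prefix,
      show (0 : Int) = ((0 : Nat) : Int) from rfl, PySem.Str.pyGet?_natCast]
  cases p.toList <;> simp

theorem pv_tsA_none_step (st : Int × Int × PySem.Dict String (List (Int × Int))) (t : String) :
    (pvTsA none st t).2.2 = st.2.2 := by
  unfold pvTsA; split_ifs <;> simp [pvAppendA]

theorem pv_tsA_none_fold (ts : List String) :
    ∀ st, (ts.foldl (pvTsA none) st).2.2 = st.2.2 := by
  induction ts with
  | nil => intro st; rfl
  | cons t ts ih => intro st; rw [List.foldl_cons, ih, pv_tsA_none_step]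

theorem pv_tsA_stuck_step (e : String) (st : Int × Int × PySem.Dict String (List (Int × Int)))
    (t : String) (h : st.2.2.get? e = none) : (pvTsA (some e) st t).2.2 = st.2.2 := by
  unfold pvTsA; split_ifs <;> simp [pvAppendA, h]

theorem pv_tsA_stuck_fold (e : String) (ts : List String) :
    ∀ st, st.2.2.get? e = none → (ts.foldl (pvTsA (some e)) st).2.2 = st.2.2 := by
  induction ts with
  | nil => intro st _; rfl
  | cons t ts ih =>
    intro st h
    have hstep := pv_tsA_stuck_step e st t h
    rw [List.foldl_cons, ih _ (by rw [hstep]; exact h), hstep]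

-- the per-part steps agree on states with Nodup keys
theorem pv_step_eq (size : Int) (p : String) (_hp : p.toList ≠ [])
    (hblk : PySem.Str.startswith p "[" = true → 1 ≤ size → pvBlockOK p size = true)
    (st : PySem.Dict String (List (Int × Int)) × Option String) (hnd : st.1.keys.Nodup) :
    pvPartA size st p = pvPartB size st p := by
  by_cases hb0 : PySem.Str.pyGet? p 0 = some '['
  · have hsw : PySem.Str.startswith p "[" = true := (pv_startswith_lb p).2 hb0
    rw [pvPartA, pvPartB, if_pos hb0, if_pos hsw]
    dsimp only
    set ts := (PySem.Str.split? p "-").getD [] with hts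
    by_cases hsz : 1 ≤ size
    · -- canonical block
      have hbOK := hblk hsw hsz
      rw [pvBlockOK, Bool.and_eq_true, decide_eq_true_iff] at hbOK
      obtain ⟨hlen, hcanon⟩ := hbOK
      rw [← hts] at hlen
      set m : Int := 2 * size - 1 with hm
      have hm1 : (1 : Int) ≤ m := by omega
      set xs := ts.take m.toNat with hxs
      have hmle : m.toNat ≤ ts.length := by omega
      have hxs_len : (xs.length : Int) = m := by
        simp only [hxs, List.length_take]
        omega
      have hfold : (PySem.List.pyRange 0 m 1).foldl
            (fun s2 j => pvTsA st.2 s2 (PySem.List.pyGetD ts j "")) (-1, -1, st.1)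
          = xs.foldl (pvTsA st.2) (-1, -1, st.1) := by
        rw [PySem.List.foldl_congr_mem _ _
              (fun s2 j => pvTsA st.2 s2 (PySem.List.pyGetD xs j "")) _ ?_]
        · rw [show m = (xs.length : Int) from hxs_len.symm]
          exact PySem.List.foldl_pyRange_zero_pyGetD' xs "" (pvTsA st.2) _
        · intro s2 j hj
          rw [PySem.List.mem_pyRange_one] at hj
          have h0 : (0 : Int) ≤ j := hj.1
          show pvTsA st.2 s2 (PySem.List.pyGetD ts j "") = pvTsA st.2 s2 (PySem.List.pyGetD xs j "")
          rw [PySem.List.pyGetD_of_nonneg _ _ h0, PySem.List.pyGetD_of_nonneg _ _ h0]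
          congr 1
          rw [List.getD_eq_getElem?_getD, List.getD_eq_getElem?_getD, hxs,
              List.getElem?_take_of_lt (by omega)]
      have hlimit : max (2 * size - 1) 0 = m := by omega
      have hslice : PySem.List.slice ts none (some m) = xs :=
        PySem.List.slice_to ts (by omega)
      have hnums : (PySem.List.slice ts none (some (max (2 * size - 1) 0))).foldl
            (fun acc tok => acc ++ (pvDigitRuns tok.toList).map
              (fun r => (PySem.Int.ofChars? r).getD 0)) []
          = pvNums xs := by
        rw [hlimit, hslice, PySem.List.foldl_append_eq_flatMap, List.nil_append, pvNums]
      rw [hfold, hnums]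
      cases hle : st.2 with
      | none => rw [pv_tsA_none_fold]
      | some e =>
        cases hge : st.1.get? e with
        | none => rw [pv_tsA_stuck_fold e xs _ hge]; simp [hge]
        | some l => rw [pv_core e xs hcanon st.1 l hnd hge]; simp [hge]
    · -- size ≤ 0 : A's inner loop is empty, B extracts no tokens
      have hrange : PySem.List.pyRange 0 (2 * size - 1) 1 = [] :=
        PySem.List.pyRange_one_eq_nil (by omega)
      have hlimit : max (2 * size - 1) 0 = 0 := by omega
      have hslice : PySem.List.slice ts none (some (0 : Int)) = [] := by
        rw [PySem.List.slice_to ts (by omega)]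
        simp
      rw [hrange, hlimit, hslice]
      simp only [List.foldl_nil]
      cases hle : st.2 with
      | none => rfl
      | some e =>
        cases hge : st.1.get? e with
        | none => simp [hge]
        | some l =>
          simp only [hge, pvPairUp, List.append_nil]
          rw [pv_insert_get_self st.1 e l hnd hge]
  · have hsw : PySem.Str.startswith p "[" = false := by
      cases hths : PySem.Str.startswith p "[" with
      | false => rfl
      | true => exact absurd ((pv_startswith_lb p).1 hths) hb0
    rw [pvPartA, pvPartB, if_neg hb0,
        if_neg (show ¬ (PySem.Str.startswith p "[" = true) by simp only [hsw]; simp)]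
    by_cases hc : st.1.contains p = true
    · rw [PySem.Dict.setdefault_of_contains _ _ hc, if_neg (not_not_intro hc)]
    · rw [PySem.Dict.setdefault_of_not_contains _ _ (by simpa using hc), if_pos hc]

theorem pv_step_nodup (size : Int) (p : String)
    (st : PySem.Dict String (List (Int × Int)) × Option String) (hnd : st.1.keys.Nodup) :
    (pvPartB size st p).1.keys.Nodup := by
  rw [pvPartB]
  by_cases hsw : PySem.Str.startswith p "[" = true
  · rw [if_pos hsw]
    dsimp only
    cases st.2 with
    | none => exact hnd
    | some e =>
      cases hge : st.1.get? e with
      | none => simp only [hge]; exact hnd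
      | some l => simp only [hge]; exact PySem.Dict.nodup_keys_insert _ _ _ hnd
  · rw [if_neg hsw]
    by_cases hc : st.1.contains p = true
    · rw [PySem.Dict.setdefault_of_contains _ _ hc]; exact hnd
    · rw [PySem.Dict.setdefault_of_not_contains _ _ (by simpa using hc)]
      exact PySem.Dict.nodup_keys_insert _ _ _ hnd

theorem pv_fold_eq (size : Int) (parts : List String)
    (h : ∀ p ∈ parts, p.toList ≠ [] ∧ (PySem.Str.startswith p "[" = true → 1 ≤ size → pvBlockOK p size = true)) :
    ∀ (st : PySem.Dict String (List (Int × Int)) × Option String), st.1.keys.Nodup →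
      parts.foldl (pvPartA size) st = parts.foldl (pvPartB size) st := by
  induction parts with
  | nil => intro st _; rfl
  | cons p parts ih =>
    intro st hnd
    have hm := h p (by simp)
    rw [List.foldl_cons, List.foldl_cons,
        pv_step_eq size p hm.1 hm.2 st hnd,
        ih (fun q hq => h q (by simp [hq])) _ (pv_step_nodup size p st hnd)]

-- ===== VERDICT (by name: the statement is the Claim_ definition above) =====
theorem parse_raw_instances_spec : Claim_equal_parse_raw_instances := by
  intro raw size _ hpre
  show parse_raw_instances raw size = parse_raw_instances_alt raw size
  simp only [parse_raw_instances, parse_raw_instances_alt]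
  rw [PySem.List.foldl_pyRange_zero_pyGetD' ((PySem.Str.split? raw " ").getD []) "" (pvPartA size) (PySem.Dict.empty, none),
      pv_fold_eq size ((PySem.Str.split? raw " ").getD [])
        (fun p hp => ⟨hpre.1 p hp, hpre.2.2 p hp⟩)
        (PySem.Dict.empty, none) PySem.Dict.nodup_keys_empty]
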